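-- pv_equiv track=rewrite | github.com/HemantBK/AI-Wildlife-Tracker | src/preprocessing/cleaner.py | normalize_location
-- ===== SOURCE A (Python) =====
-- LOCATION_ALIASES = {
--     "bangalore": "Karnataka",
--     "bengaluru": "Karnataka",
--     "mumbai": "Maharashtra",
--     "bombay": "Maharashtra",
--     "chennai": "Tamil Nadu",
--     "madras": "Tamil Nadu",
--     "kolkata": "West Bengal",
--     "calcutta": "West Bengal",
--     "delhi": "Delhi",
--     "new delhi": "Delhi",
--     "hyderabad": "Telangana",
--     "pune": "Maharashtra",
--     "ahmedabad": "Gujarat",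
--     "jaipur": "Rajasthan",
--     "lucknow": "Uttar Pradesh",
--     "kochi": "Kerala",
--     "cochin": "Kerala",
--     "thiruvananthapuram": "Kerala",
--     "trivandrum": "Kerala",
--     "guwahati": "Assam",
--     "shimla": "Himachal Pradesh",
--     "dehradun": "Uttarakhand",
--     "bhopal": "Madhya Pradesh",
--     "raipur": "Chhattisgarh",
--     "ranchi": "Jharkhand",
--     "patna": "Bihar",
--     "bhubaneswar": "Odisha",
--     "gangtok": "Sikkim",
--     "imphal": "Manipur",
--     "shillong": "Meghalaya",
--     "aizawl": "Mizoram",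
--     "kohima": "Nagaland",
--     "agartala": "Tripura",
--     "itanagar": "Arunachal Pradesh",
--     "panaji": "Goa",
--     "port blair": "Andaman and Nicobar Islands",
--     "srinagar": "Jammu and Kashmir",
--     "leh": "Ladakh",
--     "chandigarh": "Punjab",
-- }
--
-- def normalize_location(location: str) -> str:
--     """Normalize a location name to Indian state."""
--     loc_lower = location.lower().strip()
--     if loc_lower in LOCATION_ALIASES:
--         return LOCATION_ALIASES[loc_lower]
--     # Check if it's already a valid state name
--     for state in LOCATION_ALIASES.values():
--         if state.lower() == loc_lower:
--             return state
--     return location.strip()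
-- ===== SOURCE B (Python) =====
-- # Inverted data layout: states grouped with their city aliases; one flat lookup
-- # table built from it at import time, so each call is a single dict lookup.
-- STATE_CITIES = {
--     "Karnataka": ["bangalore", "bengaluru"],
--     "Maharashtra": ["mumbai", "bombay", "pune"],
--     "Tamil Nadu": ["chennai", "madras"],
--     "West Bengal": ["kolkata", "calcutta"],
--     "Delhi": ["delhi", "new delhi"],
--     "Telangana": ["hyderabad"],
--     "Gujarat": ["ahmedabad"],
--     "Rajasthan": ["jaipur"],
--     "Uttar Pradesh": ["lucknow"],
--     "Kerala": ["kochi", "cochin", "thiruvananthapuram", "trivandrum"],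
--     "Assam": ["guwahati"],
--     "Himachal Pradesh": ["shimla"],
--     "Uttarakhand": ["dehradun"],
--     "Madhya Pradesh": ["bhopal"],
--     "Chhattisgarh": ["raipur"],
--     "Jharkhand": ["ranchi"],
--     "Bihar": ["patna"],
--     "Odisha": ["bhubaneswar"],
--     "Sikkim": ["gangtok"],
--     "Manipur": ["imphal"],
--     "Meghalaya": ["shillong"],
--     "Mizoram": ["aizawl"],
--     "Nagaland": ["kohima"],
--     "Tripura": ["agartala"],
--     "Arunachal Pradesh": ["itanagar"],
--     "Goa": ["panaji"],
--     "Andaman and Nicobar Islands": ["port blair"],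
--     "Jammu and Kashmir": ["srinagar"],
--     "Ladakh": ["leh"],
--     "Punjab": ["chandigarh"],
-- }
--
-- _LOOKUP = {}
-- for _state, _cities in STATE_CITIES.items():
--     _LOOKUP[_state.lower()] = _state
--     for _city in _cities:
--         _LOOKUP[_city] = _state
--
--
-- def normalize_location(location: str) -> str:
--     """Normalize a location name to Indian state."""
--     return _LOOKUP.get(location.lower().strip(), location.strip())
-- ===== Notes on version B (the rewrite author's own statement) =====
-- stated objective: idiomatic
-- what changed: The alias dict plus a per-call linear scan over state values is replaced by an inverted grouped table (state -> its city aliases) flattened once at import time into a single lookup dict, so each call is one indexed lookup with a default.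
import Mathlib
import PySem

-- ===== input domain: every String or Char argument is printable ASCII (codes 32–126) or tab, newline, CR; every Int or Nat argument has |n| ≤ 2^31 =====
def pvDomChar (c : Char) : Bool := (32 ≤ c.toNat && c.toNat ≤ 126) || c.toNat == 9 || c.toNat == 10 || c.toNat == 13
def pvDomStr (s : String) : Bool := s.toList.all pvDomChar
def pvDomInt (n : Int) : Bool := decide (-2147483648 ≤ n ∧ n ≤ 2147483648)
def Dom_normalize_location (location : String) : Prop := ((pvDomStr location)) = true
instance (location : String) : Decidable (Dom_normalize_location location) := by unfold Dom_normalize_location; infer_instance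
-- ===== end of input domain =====

-- B replaces A's alias-dict-then-value-scan with an inverted grouped table (state -> its
-- city aliases) flattened once at module level into a single lookup dict (idiomatic).


-- ===== PORT A =====
-- module-level dict literal (all keys distinct)
def LOCATION_ALIASES : PySem.Dict String String := PySem.Dict.mk [
  ("bangalore", "Karnataka"), ("bengaluru", "Karnataka"),
  ("mumbai", "Maharashtra"), ("bombay", "Maharashtra"),
  ("chennai", "Tamil Nadu"), ("madras", "Tamil Nadu"),
  ("kolkata", "West Bengal"), ("calcutta", "West Bengal"),
  ("delhi", "Delhi"), ("new delhi", "Delhi"),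
  ("hyderabad", "Telangana"), ("pune", "Maharashtra"),
  ("ahmedabad", "Gujarat"), ("jaipur", "Rajasthan"),
  ("lucknow", "Uttar Pradesh"), ("kochi", "Kerala"),
  ("cochin", "Kerala"), ("thiruvananthapuram", "Kerala"),
  ("trivandrum", "Kerala"), ("guwahati", "Assam"),
  ("shimla", "Himachal Pradesh"), ("dehradun", "Uttarakhand"),
  ("bhopal", "Madhya Pradesh"), ("raipur", "Chhattisgarh"),
  ("ranchi", "Jharkhand"), ("patna", "Bihar"),
  ("bhubaneswar", "Odisha"), ("gangtok", "Sikkim"),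
  ("imphal", "Manipur"), ("shillong", "Meghalaya"),
  ("aizawl", "Mizoram"), ("kohima", "Nagaland"),
  ("agartala", "Tripura"), ("itanagar", "Arunachal Pradesh"),
  ("panaji", "Goa"), ("port blair", "Andaman and Nicobar Islands"),
  ("srinagar", "Jammu and Kashmir"), ("leh", "Ladakh"),
  ("chandigarh", "Punjab")]

-- A's 'for state in LOCATION_ALIASES.values(): if state.lower() == loc_lower: return state'
def findStateScan (states : List String) (locLower : String) : Option String :=
  match states with
  | [] => none
  | s :: rest => if PySem.Str.lower s == locLower then some s else findStateScan rest locLower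

def normalize_location (location : String) : String :=
  let loc_lower := PySem.Str.strip (PySem.Str.lower location)
  if LOCATION_ALIASES.contains loc_lower then
    (LOCATION_ALIASES.get? loc_lower).getD ""   -- LOCATION_ALIASES[loc_lower]; the guard makes the lookup succeed
  else
    match findStateScan LOCATION_ALIASES.values loc_lower with
    | some state => state
    | none => PySem.Str.strip location

-- ===== PORT B =====
-- STATE_CITIES: each state grouped with its city aliases (Source B's module literal)
def STATE_CITIES : List (String × List String) := [
  ("Karnataka", ["bangalore", "bengaluru"]),
  ("Maharashtra", ["mumbai", "bombay", "pune"]),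
  ("Tamil Nadu", ["chennai", "madras"]),
  ("West Bengal", ["kolkata", "calcutta"]),
  ("Delhi", ["delhi", "new delhi"]),
  ("Telangana", ["hyderabad"]),
  ("Gujarat", ["ahmedabad"]),
  ("Rajasthan", ["jaipur"]),
  ("Uttar Pradesh", ["lucknow"]),
  ("Kerala", ["kochi", "cochin", "thiruvananthapuram", "trivandrum"]),
  ("Assam", ["guwahati"]),
  ("Himachal Pradesh", ["shimla"]),
  ("Uttarakhand", ["dehradun"]),
  ("Madhya Pradesh", ["bhopal"]),
  ("Chhattisgarh", ["raipur"]),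
  ("Jharkhand", ["ranchi"]),
  ("Bihar", ["patna"]),
  ("Odisha", ["bhubaneswar"]),
  ("Sikkim", ["gangtok"]),
  ("Manipur", ["imphal"]),
  ("Meghalaya", ["shillong"]),
  ("Mizoram", ["aizawl"]),
  ("Nagaland", ["kohima"]),
  ("Tripura", ["agartala"]),
  ("Arunachal Pradesh", ["itanagar"]),
  ("Goa", ["panaji"]),
  ("Andaman and Nicobar Islands", ["port blair"]),
  ("Jammu and Kashmir", ["srinagar"]),
  ("Ladakh", ["leh"]),
  ("Punjab", ["chandigarh"])]

-- the import-time loop: _LOOKUP[state.lower()] = state; for city: _LOOKUP[city] = state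
def LOOKUP : PySem.Dict String String :=
  STATE_CITIES.foldl
    (fun d p =>
      (p.2).foldl (fun d c => d.insert c p.1) (d.insert (PySem.Str.lower p.1) p.1))
    PySem.Dict.empty

def normalize_location_alt (location : String) : String :=
  LOOKUP.getD (PySem.Str.strip (PySem.Str.lower location)) (PySem.Str.strip location)

-- ===== PRECONDITION & SPEC =====
def Spec_normalize_location (location : String) (out : String) : Prop := out = normalize_location_alt location
instance (location : String) (out : String) : Decidable (Spec_normalize_location location out) := by unfold Spec_normalize_location; infer_instance

-- ===== CLAIM (what is proved, stated in full; the proofs are below) =====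
def Claim_equal_normalize_location : Prop := ∀ (location : String), Dom_normalize_location location → Spec_normalize_location location (normalize_location location)

-- ===== LEMMAS AND PROOFS =====

-- every key either table can answer
def ALLK : List String := LOCATION_ALIASES.keys ++ LOCATION_ALIASES.values.map PySem.Str.lower

-- A's two-stage answer, independent of the fallback
def answerA (k : String) : Option String :=
  (LOCATION_ALIASES.get? k).or (findStateScan LOCATION_ALIASES.values k)

theorem findStateScan_none (l : List String) (k : String)
    (h : k ∉ l.map PySem.Str.lower) : findStateScan l k = none := by
  induction l with
  | nil => rfl
  | cons v rest ih =>
    simp only [List.map_cons, List.mem_cons] at h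
    push Not at h
    simp [findStateScan, beq_eq_false_iff_ne.mpr (fun e => h.1 e.symm), ih h.2]

set_option maxRecDepth 8192 in
theorem answers_agree (k : String) : answerA k = LOOKUP.get? k := by
  by_cases hk : k ∈ ALLK
  · fin_cases hk <;> decide
  · have hk2 := hk
    unfold ALLK at hk2
    rw [List.mem_append] at hk2
    push Not at hk2
    have hA : LOCATION_ALIASES.get? k = none :=
      (PySem.Dict.get?_eq_none_iff_not_mem_keys _ _).mpr hk2.1
    have hS : findStateScan LOCATION_ALIASES.values k = none :=
      findStateScan_none _ _ hk2.2
    have hsub : ∀ x ∈ LOOKUP.keys, x ∈ ALLK := by decide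
    have hB : LOOKUP.get? k = none := by
      rw [PySem.Dict.get?_eq_none_iff_not_mem_keys]
      intro hmem
      exact hk (hsub k hmem)
    simp [answerA, hA, hS, hB]

theorem normalize_location_spec : Claim_equal_normalize_location := by
  unfold Claim_equal_normalize_location
  intro location _
  unfold Spec_normalize_location normalize_location normalize_location_alt
  set k := PySem.Str.strip (PySem.Str.lower location) with hkdef
  have h := answers_agree k
  unfold answerA at h
  rw [PySem.Dict.getD, ← h]
  cases hA : LOCATION_ALIASES.get? k with
  | some v =>
    have hc : LOCATION_ALIASES.contains k = true := by
      rw [PySem.Dict.contains_eq_isSome_get?, hA]; rfl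
    simp [hA, hc]
  | none =>
    have hc : LOCATION_ALIASES.contains k = false := by
      rw [PySem.Dict.contains_eq_isSome_get?, hA]; rfl
    cases hS : findStateScan LOCATION_ALIASES.values k <;> simp [hc, hS]
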